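-- pv_equiv track=rewrite | github.com/sachinchandra/voxbridge | voxbridge/audio/codecs.py | _mulaw_encode_sample
-- ===== SOURCE A (Python) =====
-- _MULAW_BIAS = 0x84
--
-- _MULAW_CLIP = 32635
--
-- def _mulaw_encode_sample(sample: int) -> int:
--     """Encode a single 16-bit PCM sample to mu-law (ITU-T G.711)."""
--     # Determine sign
--     if sample < 0:
--         sign = 0x80
--         sample = -sample
--     else:
--         sign = 0
--
--     # Clip to valid range
--     if sample > _MULAW_CLIP:
--         sample = _MULAW_CLIP
--
--     # Add bias
--     sample = sample + _MULAW_BIAS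
--
--     # Find the exponent by looking at the position of the highest set bit
--     exponent = 7
--     exp_mask = 0x4000  # bit 14
--     for _ in range(8):
--         if sample & exp_mask:
--             break
--         exponent -= 1
--         exp_mask >>= 1
--
--     # Extract mantissa (4 bits)
--     mantissa = (sample >> (exponent + 3)) & 0x0F
--
--     # Combine and complement
--     mulaw_byte = ~(sign | (exponent << 4) | mantissa) & 0xFF
--     return mulaw_byte
-- ===== SOURCE B (Python) =====
-- _MULAW_BIAS = 0x84
--
-- _MULAW_CLIP = 32635
--
-- def _mulaw_encode_sample(sample: int) -> int:
--     """Encode a single 16-bit PCM sample to mu-law (ITU-T G.711)."""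
--     sign = 0x80 if sample < 0 else 0
--     # clipped magnitude plus bias; now in [0x84, 0x7FFF]
--     mag = min(abs(sample), _MULAW_CLIP) + _MULAW_BIAS
--     # halve until the magnitude fits one segment; the halving count is the exponent
--     exponent = 0
--     while mag >= 0x100:
--         mag //= 2
--         exponent += 1
--     # mag is now in [0x80, 0xFF], so mag // 8 - 16 is the 4-bit mantissa; the three
--     # fields are disjoint and sum below 256, so complement/or is plain arithmetic
--     return 255 - (sign + 16 * exponent + (mag // 8 - 16))
-- ===== Notes on version B (the rewrite author's own statement) =====
-- stated objective: alternative
-- what changed: A's fixed 8-iteration mask-scan (AND against a shifting exp_mask) and bitwise field assembly (~, |, &, >>) are replaced by a halving while-loop (mag //= 2 until mag < 0x100, counting halvings as the exponent) and pure arithmetic: mantissa = mag // 8 - 16 and result = 255 - (sign + 16*exponent + mantissa), valid because the three fields are disjoint and sum below 256.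
import Mathlib
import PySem

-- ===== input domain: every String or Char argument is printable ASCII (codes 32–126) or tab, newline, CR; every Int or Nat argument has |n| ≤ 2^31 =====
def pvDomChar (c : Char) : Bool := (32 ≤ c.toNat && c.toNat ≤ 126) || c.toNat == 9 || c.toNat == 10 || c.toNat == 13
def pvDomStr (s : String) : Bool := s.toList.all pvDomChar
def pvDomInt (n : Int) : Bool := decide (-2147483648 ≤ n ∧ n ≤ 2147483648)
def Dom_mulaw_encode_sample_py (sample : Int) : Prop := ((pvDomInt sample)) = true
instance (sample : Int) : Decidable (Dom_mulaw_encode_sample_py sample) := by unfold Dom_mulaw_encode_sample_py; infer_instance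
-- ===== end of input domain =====

-- B replaces A's fixed 8-step mask-scan and bitwise field assembly by a halving while-loop
-- and plain arithmetic (objective: alternative decomposition).

-- ===== PORT A =====
-- A's `for _ in range(8)` loop with `break`: fuel-counted recursion over (exponent, exp_mask)
def mulawLoopA (sample : Int) : Nat → Int → Int → Int
  | 0, exponent, _ => exponent
  | n + 1, exponent, exp_mask =>
    if PySem.Int.band sample exp_mask ≠ 0 then exponent
    else mulawLoopA sample n (exponent - 1) (exp_mask >>> 1)

def mulaw_encode_sample_py (sample : Int) : Int :=
  let sign : Int := if sample < 0 then 0x80 else 0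
  let sample := if sample < 0 then -sample else sample
  let sample := if sample > 32635 then 32635 else sample
  let sample := sample + 0x84
  let exponent := mulawLoopA sample 8 7 0x4000
  -- `sample >> (exponent + 3)`: exponent + 3 ≥ 0 on every input, so .toNat is exact
  let mantissa := PySem.Int.band (sample >>> (exponent + 3).toNat) 0x0F
  PySem.Int.band (Int.not (PySem.Int.bor (PySem.Int.bor sign (exponent <<< (4 : Nat))) mantissa)) 0xFF

-- ===== PORT B =====
-- B's `while mag >= 0x100: mag //= 2; exponent += 1` loop (terminates: mag strictly shrinks)
def mulawLoopB (mag : Int) (exponent : Int) : Int × Int :=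
  if h : 256 ≤ mag then mulawLoopB (PySem.Int.floordiv mag 2) (exponent + 1)
  else (mag, exponent)
termination_by mag.toNat
decreasing_by
  rw [PySem.Int.floordiv_eq_ediv_of_pos (by omega)]
  omega

def mulaw_encode_sample_py_alt (sample : Int) : Int :=
  let sign : Int := if sample < 0 then 0x80 else 0
  let mag := min |sample| 32635 + 0x84
  let p := mulawLoopB mag 0
  255 - (sign + 16 * p.2 + (PySem.Int.floordiv p.1 8 - 16))

-- ===== PRECONDITION & SPEC =====
def Spec_mulaw_encode_sample_py (sample : Int) (out : Int) : Prop := out = mulaw_encode_sample_py_alt sample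
instance (sample : Int) (out : Int) : Decidable (Spec_mulaw_encode_sample_py sample out) := by unfold Spec_mulaw_encode_sample_py; infer_instance

-- ===== CLAIM (what is proved, stated in full; the proofs are below) =====
def Claim_equal_mulaw_encode_sample_py : Prop := ∀ (sample : Int), Dom_mulaw_encode_sample_py sample → Spec_mulaw_encode_sample_py sample (mulaw_encode_sample_py sample)

-- ===== LEMMAS AND PROOFS =====

-- s & 2^i = 0 when s has no bit i (0 ≤ s < 2^i)
lemma band_pow_zero (s m : Int) (i : Nat) (hm : m = (2 : Int) ^ i)
    (h0 : 0 ≤ s) (h : s.natAbs < 2 ^ i) : PySem.Int.band s m = 0 := by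
  have hmn : m = ((2 ^ i : Nat) : Int) := by push_cast [hm]; ring
  rw [hmn, PySem.Int.band_of_nonneg h0 (by positivity)]
  have ht : s.toNat = s.natAbs := by omega
  have htn : ((2 ^ i : Nat) : Int).toNat = 2 ^ i := by
    have : (0:Int) ≤ ((2 ^ i : Nat) : Int) := by positivity
    omega
  rw [htn, ht, Nat.and_two_pow, Nat.testBit_lt_two_pow h]
  simp

-- s & 2^i ≠ 0 when bit i is s's top set bit (2^i ≤ s < 2^(i+1))
lemma band_pow_ne_zero (s m : Int) (i : Nat) (hm : m = (2 : Int) ^ i)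
    (h0 : 0 ≤ s) (hl : 2 ^ i ≤ s.natAbs) (hu : s.natAbs < 2 ^ (i + 1)) :
    PySem.Int.band s m ≠ 0 := by
  have hmn : m = ((2 ^ i : Nat) : Int) := by push_cast [hm]; ring
  rw [hmn, PySem.Int.band_of_nonneg h0 (by positivity)]
  have ht : s.toNat = s.natAbs := by omega
  have htn : ((2 ^ i : Nat) : Int).toNat = 2 ^ i := by
    have : (0:Int) ≤ ((2 ^ i : Nat) : Int) := by positivity
    omega
  have hpos : 0 < 2 ^ i := Nat.pow_pos (by norm_num)
  have hdiv : s.natAbs / 2 ^ i = 1 := by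
    have hd1 : 1 ≤ s.natAbs / 2 ^ i := (Nat.le_div_iff_mul_le hpos).mpr (by omega)
    have hd2 : s.natAbs / 2 ^ i < 2 := by
      rw [Nat.div_lt_iff_lt_mul hpos]
      calc s.natAbs < 2 ^ (i + 1) := hu
        _ = 2 * 2 ^ i := by ring
    omega
  have hbit : s.natAbs.testBit i = true := by
    rw [Nat.testBit_eq_decide_div_mod_eq, hdiv]
    decide
  rw [htn, ht, Nat.and_two_pow, hbit]
  simp

-- once the exponent and mantissa fields are literals, A's bitwise combine is B's arithmetic one
lemma final_eq (sg e t : Int) (hsg : sg = 0 ∨ sg = 128) (he0 : 0 ≤ e) (he7 : e ≤ 7)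
    (ht0 : 16 ≤ t) (ht1 : t ≤ 31) :
    PySem.Int.band (Int.not (PySem.Int.bor (PySem.Int.bor sg (e <<< (4 : Nat))) (PySem.Int.band t 15))) 255
      = 255 - (sg + 16 * e + (t - 16)) := by
  rcases hsg with h | h <;> subst h <;> interval_cases e <;> interval_cases t <;> decide


-- the heart of the equivalence, on the shared biased magnitude s ∈ [132, 32767]
lemma core (sg s : Int) (hsg : sg = 0 ∨ sg = 128) (h1 : 132 ≤ s) (h2 : s ≤ 32767) :
    PySem.Int.band (Int.not (PySem.Int.bor (PySem.Int.bor sg ((mulawLoopA s 8 7 0x4000) <<< (4 : Nat)))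
        (PySem.Int.band (s >>> ((mulawLoopA s 8 7 0x4000) + 3).toNat) 0x0F))) 0xFF
      = 255 - (sg + 16 * (mulawLoopB s 0).2 + (PySem.Int.floordiv (mulawLoopB s 0).1 8 - 16)) := by
  have sh1 : (0x4000 : Int) >>> (1:Int) = 0x2000 := by decide
  have sh2 : (0x2000 : Int) >>> (1:Int) = 0x1000 := by decide
  have sh3 : (0x1000 : Int) >>> (1:Int) = 0x800 := by decide
  have sh4 : (0x800 : Int) >>> (1:Int) = 0x400 := by decide
  have sh5 : (0x400 : Int) >>> (1:Int) = 0x200 := by decide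
  have sh6 : (0x200 : Int) >>> (1:Int) = 0x100 := by decide
  have sh7 : (0x100 : Int) >>> (1:Int) = 0x80 := by decide
  rcases (show (132 ≤ s ∧ s ≤ 255) ∨ (256 ≤ s ∧ s ≤ 511) ∨ (512 ≤ s ∧ s ≤ 1023) ∨ (1024 ≤ s ∧ s ≤ 2047) ∨ (2048 ≤ s ∧ s ≤ 4095) ∨ (4096 ≤ s ∧ s ≤ 8191) ∨ (8192 ≤ s ∧ s ≤ 16383) ∨ (16384 ≤ s ∧ s ≤ 32767) from by omega) with ⟨hl,hu⟩|⟨hl,hu⟩|⟨hl,hu⟩|⟨hl,hu⟩|⟨hl,hu⟩|⟨hl,hu⟩|⟨hl,hu⟩|⟨hl,hu⟩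
  · -- e = 0
    have z14 : PySem.Int.band s 16384 = 0 := band_pow_zero s _ 14 (by norm_num) (by omega) (by omega)
    have z13 : PySem.Int.band s 8192 = 0 := band_pow_zero s _ 13 (by norm_num) (by omega) (by omega)
    have z12 : PySem.Int.band s 4096 = 0 := band_pow_zero s _ 12 (by norm_num) (by omega) (by omega)
    have z11 : PySem.Int.band s 2048 = 0 := band_pow_zero s _ 11 (by norm_num) (by omega) (by omega)
    have z10 : PySem.Int.band s 1024 = 0 := band_pow_zero s _ 10 (by norm_num) (by omega) (by omega)
    have z9 : PySem.Int.band s 512 = 0 := band_pow_zero s _ 9 (by norm_num) (by omega) (by omega)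
    have z8 : PySem.Int.band s 256 = 0 := band_pow_zero s _ 8 (by norm_num) (by omega) (by omega)
    have n7 : PySem.Int.band s 128 ≠ 0 := band_pow_ne_zero s _ 7 (by norm_num) (by omega) (by omega) (by omega)
    have hA : mulawLoopA s 8 7 0x4000 = 0 := by norm_num [mulawLoopA, sh1, sh2, sh3, sh4, sh5, sh6, sh7, z14, z13, z12, z11, z10, z9, z8, n7]
    have hB : mulawLoopB s 0 = (s, 0) := by rw [mulawLoopB, dif_neg (by omega)]
    have hB1 : (mulawLoopB s 0).1 = s := by rw [hB]
    have hB2 : (mulawLoopB s 0).2 = 0 := by rw [hB]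
    rw [hA, hB1, hB2]
    rw [show ((0:Int)+3).toNat = (3 : Nat) from by decide]
    rw [Int.shiftRight_eq_div_pow]
    rw [PySem.Int.floordiv_eq_ediv_of_pos (by norm_num : (0:Int) < 8)]
    have ht2 : s / ((2 ^ 3 : Nat) : Int) = s / 8 := by norm_num
    rw [ht2]
    exact final_eq sg 0 (s / 8) hsg (by norm_num) (by norm_num) (by omega) (by omega)
  · -- e = 1
    have z14 : PySem.Int.band s 16384 = 0 := band_pow_zero s _ 14 (by norm_num) (by omega) (by omega)
    have z13 : PySem.Int.band s 8192 = 0 := band_pow_zero s _ 13 (by norm_num) (by omega) (by omega)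
    have z12 : PySem.Int.band s 4096 = 0 := band_pow_zero s _ 12 (by norm_num) (by omega) (by omega)
    have z11 : PySem.Int.band s 2048 = 0 := band_pow_zero s _ 11 (by norm_num) (by omega) (by omega)
    have z10 : PySem.Int.band s 1024 = 0 := band_pow_zero s _ 10 (by norm_num) (by omega) (by omega)
    have z9 : PySem.Int.band s 512 = 0 := band_pow_zero s _ 9 (by norm_num) (by omega) (by omega)
    have n8 : PySem.Int.band s 256 ≠ 0 := band_pow_ne_zero s _ 8 (by norm_num) (by omega) (by omega) (by omega)
    have hA : mulawLoopA s 8 7 0x4000 = 1 := by norm_num [mulawLoopA, sh1, sh2, sh3, sh4, sh5, sh6, z14, z13, z12, z11, z10, z9, n8]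
    have hB : mulawLoopB s 0 = (s / 2, 1) := by
      rw [mulawLoopB, dif_pos (by omega), PySem.Int.floordiv_eq_ediv_of_pos (by norm_num : (0:Int) < 2), mulawLoopB, dif_neg (by omega)]
      simp only [Prod.mk.injEq]
      exact ⟨trivial, by omega⟩
    have hB1 : (mulawLoopB s 0).1 = s / 2 := by rw [hB]
    have hB2 : (mulawLoopB s 0).2 = 1 := by rw [hB]
    rw [hA, hB1, hB2]
    rw [show ((1:Int)+3).toNat = (4 : Nat) from by decide]
    rw [Int.shiftRight_eq_div_pow]
    rw [PySem.Int.floordiv_eq_ediv_of_pos (by norm_num : (0:Int) < 8)]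
    have ht2 : s / ((2 ^ 4 : Nat) : Int) = s / 16 := by norm_num
    have ht : s / 2 / 8 = s / 16 := by omega
    rw [ht, ht2]
    exact final_eq sg 1 (s / 16) hsg (by norm_num) (by norm_num) (by omega) (by omega)
  · -- e = 2
    have z14 : PySem.Int.band s 16384 = 0 := band_pow_zero s _ 14 (by norm_num) (by omega) (by omega)
    have z13 : PySem.Int.band s 8192 = 0 := band_pow_zero s _ 13 (by norm_num) (by omega) (by omega)
    have z12 : PySem.Int.band s 4096 = 0 := band_pow_zero s _ 12 (by norm_num) (by omega) (by omega)
    have z11 : PySem.Int.band s 2048 = 0 := band_pow_zero s _ 11 (by norm_num) (by omega) (by omega)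
    have z10 : PySem.Int.band s 1024 = 0 := band_pow_zero s _ 10 (by norm_num) (by omega) (by omega)
    have n9 : PySem.Int.band s 512 ≠ 0 := band_pow_ne_zero s _ 9 (by norm_num) (by omega) (by omega) (by omega)
    have hA : mulawLoopA s 8 7 0x4000 = 2 := by norm_num [mulawLoopA, sh1, sh2, sh3, sh4, sh5, z14, z13, z12, z11, z10, n9]
    have hB : mulawLoopB s 0 = (s / 4, 2) := by
      rw [mulawLoopB, dif_pos (by omega), PySem.Int.floordiv_eq_ediv_of_pos (by norm_num : (0:Int) < 2), mulawLoopB, dif_pos (by omega), PySem.Int.floordiv_eq_ediv_of_pos (by norm_num : (0:Int) < 2), mulawLoopB, dif_neg (by omega)]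
      simp only [Prod.mk.injEq]
      constructor <;> first | trivial | omega
    have hB1 : (mulawLoopB s 0).1 = s / 4 := by rw [hB]
    have hB2 : (mulawLoopB s 0).2 = 2 := by rw [hB]
    rw [hA, hB1, hB2]
    rw [show ((2:Int)+3).toNat = (5 : Nat) from by decide]
    rw [Int.shiftRight_eq_div_pow]
    rw [PySem.Int.floordiv_eq_ediv_of_pos (by norm_num : (0:Int) < 8)]
    have ht2 : s / ((2 ^ 5 : Nat) : Int) = s / 32 := by norm_num
    have ht : s / 4 / 8 = s / 32 := by omega
    rw [ht, ht2]
    exact final_eq sg 2 (s / 32) hsg (by norm_num) (by norm_num) (by omega) (by omega)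
  · -- e = 3
    have z14 : PySem.Int.band s 16384 = 0 := band_pow_zero s _ 14 (by norm_num) (by omega) (by omega)
    have z13 : PySem.Int.band s 8192 = 0 := band_pow_zero s _ 13 (by norm_num) (by omega) (by omega)
    have z12 : PySem.Int.band s 4096 = 0 := band_pow_zero s _ 12 (by norm_num) (by omega) (by omega)
    have z11 : PySem.Int.band s 2048 = 0 := band_pow_zero s _ 11 (by norm_num) (by omega) (by omega)
    have n10 : PySem.Int.band s 1024 ≠ 0 := band_pow_ne_zero s _ 10 (by norm_num) (by omega) (by omega) (by omega)
    have hA : mulawLoopA s 8 7 0x4000 = 3 := by norm_num [mulawLoopA, sh1, sh2, sh3, sh4, z14, z13, z12, z11, n10]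
    have hB : mulawLoopB s 0 = (s / 8, 3) := by
      rw [mulawLoopB, dif_pos (by omega), PySem.Int.floordiv_eq_ediv_of_pos (by norm_num : (0:Int) < 2), mulawLoopB, dif_pos (by omega), PySem.Int.floordiv_eq_ediv_of_pos (by norm_num : (0:Int) < 2), mulawLoopB, dif_pos (by omega), PySem.Int.floordiv_eq_ediv_of_pos (by norm_num : (0:Int) < 2), mulawLoopB, dif_neg (by omega)]
      simp only [Prod.mk.injEq]
      constructor <;> first | trivial | omega
    have hB1 : (mulawLoopB s 0).1 = s / 8 := by rw [hB]
    have hB2 : (mulawLoopB s 0).2 = 3 := by rw [hB]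
    rw [hA, hB1, hB2]
    rw [show ((3:Int)+3).toNat = (6 : Nat) from by decide]
    rw [Int.shiftRight_eq_div_pow]
    rw [PySem.Int.floordiv_eq_ediv_of_pos (by norm_num : (0:Int) < 8)]
    have ht2 : s / ((2 ^ 6 : Nat) : Int) = s / 64 := by norm_num
    have ht : s / 8 / 8 = s / 64 := by omega
    rw [ht, ht2]
    exact final_eq sg 3 (s / 64) hsg (by norm_num) (by norm_num) (by omega) (by omega)
  · -- e = 4
    have z14 : PySem.Int.band s 16384 = 0 := band_pow_zero s _ 14 (by norm_num) (by omega) (by omega)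
    have z13 : PySem.Int.band s 8192 = 0 := band_pow_zero s _ 13 (by norm_num) (by omega) (by omega)
    have z12 : PySem.Int.band s 4096 = 0 := band_pow_zero s _ 12 (by norm_num) (by omega) (by omega)
    have n11 : PySem.Int.band s 2048 ≠ 0 := band_pow_ne_zero s _ 11 (by norm_num) (by omega) (by omega) (by omega)
    have hA : mulawLoopA s 8 7 0x4000 = 4 := by norm_num [mulawLoopA, sh1, sh2, sh3, z14, z13, z12, n11]
    have hB : mulawLoopB s 0 = (s / 16, 4) := by
      rw [mulawLoopB, dif_pos (by omega), PySem.Int.floordiv_eq_ediv_of_pos (by norm_num : (0:Int) < 2), mulawLoopB, dif_pos (by omega), PySem.Int.floordiv_eq_ediv_of_pos (by norm_num : (0:Int) < 2), mulawLoopB, dif_pos (by omega), PySem.Int.floordiv_eq_ediv_of_pos (by norm_num : (0:Int) < 2), mulawLoopB, dif_pos (by omega), PySem.Int.floordiv_eq_ediv_of_pos (by norm_num : (0:Int) < 2), mulawLoopB, dif_neg (by omega)]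
      simp only [Prod.mk.injEq]
      constructor <;> first | trivial | omega
    have hB1 : (mulawLoopB s 0).1 = s / 16 := by rw [hB]
    have hB2 : (mulawLoopB s 0).2 = 4 := by rw [hB]
    rw [hA, hB1, hB2]
    rw [show ((4:Int)+3).toNat = (7 : Nat) from by decide]
    rw [Int.shiftRight_eq_div_pow]
    rw [PySem.Int.floordiv_eq_ediv_of_pos (by norm_num : (0:Int) < 8)]
    have ht2 : s / ((2 ^ 7 : Nat) : Int) = s / 128 := by norm_num
    have ht : s / 16 / 8 = s / 128 := by omega
    rw [ht, ht2]
    exact final_eq sg 4 (s / 128) hsg (by norm_num) (by norm_num) (by omega) (by omega)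
  · -- e = 5
    have z14 : PySem.Int.band s 16384 = 0 := band_pow_zero s _ 14 (by norm_num) (by omega) (by omega)
    have z13 : PySem.Int.band s 8192 = 0 := band_pow_zero s _ 13 (by norm_num) (by omega) (by omega)
    have n12 : PySem.Int.band s 4096 ≠ 0 := band_pow_ne_zero s _ 12 (by norm_num) (by omega) (by omega) (by omega)
    have hA : mulawLoopA s 8 7 0x4000 = 5 := by norm_num [mulawLoopA, sh1, sh2, z14, z13, n12]
    have hB : mulawLoopB s 0 = (s / 32, 5) := by
      rw [mulawLoopB, dif_pos (by omega), PySem.Int.floordiv_eq_ediv_of_pos (by norm_num : (0:Int) < 2), mulawLoopB, dif_pos (by omega), PySem.Int.floordiv_eq_ediv_of_pos (by norm_num : (0:Int) < 2), mulawLoopB, dif_pos (by omega), PySem.Int.floordiv_eq_ediv_of_pos (by norm_num : (0:Int) < 2), mulawLoopB, dif_pos (by omega), PySem.Int.floordiv_eq_ediv_of_pos (by norm_num : (0:Int) < 2), mulawLoopB, dif_pos (by omega), PySem.Int.floordiv_eq_ediv_of_pos (by norm_num : (0:Int) < 2), mulawLoopB, dif_neg (by omega)]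
      simp only [Prod.mk.injEq]
      constructor <;> first | trivial | omega
    have hB1 : (mulawLoopB s 0).1 = s / 32 := by rw [hB]
    have hB2 : (mulawLoopB s 0).2 = 5 := by rw [hB]
    rw [hA, hB1, hB2]
    rw [show ((5:Int)+3).toNat = (8 : Nat) from by decide]
    rw [Int.shiftRight_eq_div_pow]
    rw [PySem.Int.floordiv_eq_ediv_of_pos (by norm_num : (0:Int) < 8)]
    have ht2 : s / ((2 ^ 8 : Nat) : Int) = s / 256 := by norm_num
    have ht : s / 32 / 8 = s / 256 := by omega
    rw [ht, ht2]
    exact final_eq sg 5 (s / 256) hsg (by norm_num) (by norm_num) (by omega) (by omega)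
  · -- e = 6
    have z14 : PySem.Int.band s 16384 = 0 := band_pow_zero s _ 14 (by norm_num) (by omega) (by omega)
    have n13 : PySem.Int.band s 8192 ≠ 0 := band_pow_ne_zero s _ 13 (by norm_num) (by omega) (by omega) (by omega)
    have hA : mulawLoopA s 8 7 0x4000 = 6 := by norm_num [mulawLoopA, sh1, z14, n13]
    have hB : mulawLoopB s 0 = (s / 64, 6) := by
      rw [mulawLoopB, dif_pos (by omega), PySem.Int.floordiv_eq_ediv_of_pos (by norm_num : (0:Int) < 2), mulawLoopB, dif_pos (by omega), PySem.Int.floordiv_eq_ediv_of_pos (by norm_num : (0:Int) < 2), mulawLoopB, dif_pos (by omega), PySem.Int.floordiv_eq_ediv_of_pos (by norm_num : (0:Int) < 2), mulawLoopB, dif_pos (by omega), PySem.Int.floordiv_eq_ediv_of_pos (by norm_num : (0:Int) < 2), mulawLoopB, dif_pos (by omega), PySem.Int.floordiv_eq_ediv_of_pos (by norm_num : (0:Int) < 2), mulawLoopB, dif_pos (by omega), PySem.Int.floordiv_eq_ediv_of_pos (by norm_num : (0:Int) < 2), mulawLoopB, dif_neg (by omega)]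
      simp only [Prod.mk.injEq]
      constructor <;> first | trivial | omega
    have hB1 : (mulawLoopB s 0).1 = s / 64 := by rw [hB]
    have hB2 : (mulawLoopB s 0).2 = 6 := by rw [hB]
    rw [hA, hB1, hB2]
    rw [show ((6:Int)+3).toNat = (9 : Nat) from by decide]
    rw [Int.shiftRight_eq_div_pow]
    rw [PySem.Int.floordiv_eq_ediv_of_pos (by norm_num : (0:Int) < 8)]
    have ht2 : s / ((2 ^ 9 : Nat) : Int) = s / 512 := by norm_num
    have ht : s / 64 / 8 = s / 512 := by omega
    rw [ht, ht2]
    exact final_eq sg 6 (s / 512) hsg (by norm_num) (by norm_num) (by omega) (by omega)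
  · -- e = 7
    have n14 : PySem.Int.band s 16384 ≠ 0 := band_pow_ne_zero s _ 14 (by norm_num) (by omega) (by omega) (by omega)
    have hA : mulawLoopA s 8 7 0x4000 = 7 := by norm_num [mulawLoopA, n14]
    have hB : mulawLoopB s 0 = (s / 128, 7) := by
      rw [mulawLoopB, dif_pos (by omega), PySem.Int.floordiv_eq_ediv_of_pos (by norm_num : (0:Int) < 2), mulawLoopB, dif_pos (by omega), PySem.Int.floordiv_eq_ediv_of_pos (by norm_num : (0:Int) < 2), mulawLoopB, dif_pos (by omega), PySem.Int.floordiv_eq_ediv_of_pos (by norm_num : (0:Int) < 2), mulawLoopB, dif_pos (by omega), PySem.Int.floordiv_eq_ediv_of_pos (by norm_num : (0:Int) < 2), mulawLoopB, dif_pos (by omega), PySem.Int.floordiv_eq_ediv_of_pos (by norm_num : (0:Int) < 2), mulawLoopB, dif_pos (by omega), PySem.Int.floordiv_eq_ediv_of_pos (by norm_num : (0:Int) < 2), mulawLoopB, dif_pos (by omega), PySem.Int.floordiv_eq_ediv_of_pos (by norm_num : (0:Int) < 2), mulawLoopB, dif_neg (by omega)]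
      simp only [Prod.mk.injEq]
      constructor <;> first | trivial | omega
    have hB1 : (mulawLoopB s 0).1 = s / 128 := by rw [hB]
    have hB2 : (mulawLoopB s 0).2 = 7 := by rw [hB]
    rw [hA, hB1, hB2]
    rw [show ((7:Int)+3).toNat = (10 : Nat) from by decide]
    rw [Int.shiftRight_eq_div_pow]
    rw [PySem.Int.floordiv_eq_ediv_of_pos (by norm_num : (0:Int) < 8)]
    have ht2 : s / ((2 ^ 10 : Nat) : Int) = s / 1024 := by norm_num
    have ht : s / 128 / 8 = s / 1024 := by omega
    rw [ht, ht2]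
    exact final_eq sg 7 (s / 1024) hsg (by norm_num) (by norm_num) (by omega) (by omega)

-- ===== VERDICT (by name: the statement is the Claim_ definition above) =====
theorem mulaw_encode_sample_py_spec : Claim_equal_mulaw_encode_sample_py := by
  intro sample _
  unfold Spec_mulaw_encode_sample_py
  simp only [mulaw_encode_sample_py, mulaw_encode_sample_py_alt]
  by_cases h1 : sample < 0
  · by_cases h2 : -sample > 32635
    · have hm : min |sample| 32635 = 32635 := min_eq_right (by rw [abs_of_neg h1]; omega)
      simp only [if_pos h1, if_pos h2, hm]
      exact core 128 (32635 + 132) (Or.inr rfl) (by norm_num) (by norm_num)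
    · have hm : min |sample| 32635 = -sample := by
        rw [abs_of_neg h1]; exact min_eq_left (by omega)
      simp only [if_pos h1, if_neg h2, hm]
      exact core 128 (-sample + 132) (Or.inr rfl) (by omega) (by omega)
  · by_cases h2 : sample > 32635
    · have hm : min |sample| 32635 = 32635 := min_eq_right (by rw [abs_of_nonneg (by omega)]; omega)
      simp only [if_neg h1, if_pos h2, hm]
      exact core 0 (32635 + 132) (Or.inl rfl) (by norm_num) (by norm_num)
    · have hm : min |sample| 32635 = sample := by
        rw [abs_of_nonneg (by omega)]; exact min_eq_left (by omega)
      simp only [if_neg h1, if_neg h2, hm]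
      exact core 0 (sample + 132) (Or.inl rfl) (by omega) (by omega)
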